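-- pv_equiv track=rewrite | github.com/Kevinwu901113/ano-rag | tools/find_dead_code.py | idx
-- ===== SOURCE A (Python) =====
-- def idx(py):
--   m={}
--   for p in py:
--     mod=p[:-12] if p.endswith("/__init__.py") else p[:-3]
--     mod=mod.replace("/",".")
--     top=mod.split(".")[0]
--     m.setdefault(top,[]).append(p)
--   return m
-- ===== SOURCE B (Python) =====
-- def idx(py):
--     def top(p):
--         mod = p[:-12] if p.endswith("/__init__.py") else p[:-3]
--         return mod.replace("/", ".").split(".")[0]
--     keys = list(dict.fromkeys(top(p) for p in py))
--     return {t: [p for p in py if top(p) == t] for t in keys}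
-- ===== Notes on version B (the rewrite author's own statement) =====
-- stated objective: alternative
-- what changed: replaces the incremental dict setdefault/append loop by a two-phase shape: first dedupe the top-module keys in first-occurrence order (dict.fromkeys), then build the result with one filtering comprehension per key
import Mathlib
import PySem

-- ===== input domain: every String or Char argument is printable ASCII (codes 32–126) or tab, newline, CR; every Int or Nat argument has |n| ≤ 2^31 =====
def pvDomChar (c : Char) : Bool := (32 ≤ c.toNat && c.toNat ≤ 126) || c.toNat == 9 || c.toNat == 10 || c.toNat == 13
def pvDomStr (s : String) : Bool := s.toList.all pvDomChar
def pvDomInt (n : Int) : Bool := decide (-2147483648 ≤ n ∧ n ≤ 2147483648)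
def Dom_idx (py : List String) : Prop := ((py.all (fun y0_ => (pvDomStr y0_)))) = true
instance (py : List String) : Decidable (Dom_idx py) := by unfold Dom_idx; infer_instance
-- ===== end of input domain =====

-- B replaces A's incremental setdefault/append dict loop by a two-phase shape (dedupe keys, then one filter per key); same results, no speed claim.


-- ===== PORT A =====
-- top-module computation shared by both Pythons (B's `top` helper is this exact code, A inlines it):
-- mod = p[:-12] if p.endswith("/__init__.py") else p[:-3]; mod = mod.replace("/", "."); mod.split(".")[0]
-- split on the nonempty separator "." never yields an empty list, so Python's [0] is the head.
def pvTop (p : String) : String :=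
  let mod := if PySem.Str.endswith p "/__init__.py" then PySem.Str.slice p none (some (-12))
             else PySem.Str.slice p none (some (-3))
  let mod := PySem.Str.replace mod "/" "."
  match PySem.Str.split? mod "." with  -- split? is none only for sep = ""; "." is nonempty, and the parts list is never [], so [0] is its head
  | some (t :: _) => t
  | _ => ""

-- A: m = {}; for p in py: m.setdefault(top, []).append(p); return m
def idx (py : List String) : List (String × List String) :=
  (py.foldl (fun m p => m.modify (pvTop p) [] (fun v => v ++ [p]))
    (PySem.Dict.empty : PySem.Dict String (List String))).items

-- ===== PORT B =====
-- keys = list(dict.fromkeys(top(p) for p in py)); return {t: [p for p in py if top(p) == t] for t in keys}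
def idx_alt (py : List String) : List (String × List String) :=
  (PySem.List.dedup (py.map pvTop)).map (fun t => (t, py.filter (fun p => pvTop p == t)))

-- ===== PRECONDITION & SPEC =====
def Spec_idx (py : List String) (out : List (String × List String)) : Prop := out = idx_alt py
instance (py : List String) (out : List (String × List String)) : Decidable (Spec_idx py out) := by unfold Spec_idx; infer_instance

-- ===== CLAIM (what is proved, stated in full; the proofs are below) =====
def Claim_equal_idx : Prop := ∀ (py : List String), Dom_idx py → Spec_idx py (idx py)

-- ===== LEMMAS AND PROOFS =====

theorem pvKeys_idx (py : List String) :
    (py.foldl (fun m p => m.modify (pvTop p) [] (fun v => v ++ [p]))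
      (PySem.Dict.empty : PySem.Dict String (List String))).keys
      = PySem.List.dedup (py.map pvTop) := by
  rw [PySem.Dict.keys_foldl_modify_key py pvTop [] (fun _ x v => v ++ [x])]
  simp [PySem.Dict.empty, PySem.Dict.keys, PySem.Set.update, PySem.Set.ofList, PySem.List.dedup]

theorem pvGetD_idx (py : List String) (t : String) :
    (py.foldl (fun m p => m.modify (pvTop p) [] (fun v => v ++ [p]))
      (PySem.Dict.empty : PySem.Dict String (List String))).getD t []
      = py.filter (fun p => pvTop p == t) := by
  have h : py.foldl (fun m p => m.modify (pvTop p) [] (fun v => v ++ [p]))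
      (PySem.Dict.empty : PySem.Dict String (List String))
      = (py.map (fun p => (pvTop p, p))).foldl
          (fun m q => m.modify q.1 [] (fun v => v ++ [q.2])) PySem.Dict.empty := by
    rw [List.foldl_map]
  rw [h, PySem.Dict.getD_foldl_modify_append]
  simp [PySem.Dict.empty, PySem.Dict.getD, PySem.Dict.get?, List.filter_map, List.map_map, Function.comp_def]

-- ===== VERDICT (by name: the statement is the Claim_ definition above) =====
theorem idx_spec : Claim_equal_idx := by
  intro py _
  unfold Spec_idx idx idx_alt
  have hnd := PySem.Dict.nodup_keys_foldl_modify_key py pvTop [] (fun _ x v => v ++ [x])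
    (PySem.Dict.empty : PySem.Dict String (List String)) (by simp [PySem.Dict.empty])
  rw [PySem.Dict.items_eq_map_keys _ hnd [], pvKeys_idx]
  exact List.map_congr_left (fun t _ => by rw [pvGetD_idx])
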